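-- pv_equiv track=rewrite | github.com/kishangondaliya/codesignal | arcade/graphs/python/roadsBuilding.py | roadsBuilding
-- ===== SOURCE A (Python) =====
-- def roadsBuilding(cities, roads):
--     city_set = set()
--     for c in range(0, cities):
--         city_set.add(c)
--
--     city_connected = {}
--     for r in roads:
--         city_connected[str(r[0])+ '-' + str(r[1])] = True
--         city_connected[str(r[1])+ '-' + str(r[0])] = True
--
--     result_arr = []
--     for c in range(0, cities):
--         current = c
--         for j in range(0, cities):
--             token = str(current) + '-' + str(j)
--             if j != c:
--                 if token not in city_connected:
--                     result_arr.append([current, j])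
--                     city_connected[str(current) + '-'+ str(j)] = True
--                     city_connected[str(j)+ '-' + str(current) ]= True
--     return result_arr
-- ===== SOURCE B (Python) =====
-- def roadsBuilding(cities, roads):
--     pairs = []
--     for r in roads:
--         a, b = r[0], r[1]
--         lo, hi = (a, b) if a < b else (b, a)
--         if 0 <= lo < hi < cities:
--             pairs.append((lo, hi))
--     adj = {}
--     for lo, hi in pairs:
--         adj[lo] = adj.get(lo, []) + [hi]
--     result = []
--     for i in range(cities):
--         prev = i
--         for v in sorted(set(adj.get(i, []))) + [cities]:
--             for j in range(prev + 1, v):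
--                 result.append([i, j])
--             prev = v
--     return result
-- ===== Notes on version B (the rewrite author's own statement) =====
-- stated objective: alternative
-- what changed: A marks a string-keyed dict with both directions of every edge and keeps mutating it while testing every ordered pair for membership; B never tests pair membership: it buckets the normalized in-range edges by lower endpoint, sorts each bucket once, and emits each row of missing roads as the gap ranges between consecutive sorted neighbours.
import Mathlib
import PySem

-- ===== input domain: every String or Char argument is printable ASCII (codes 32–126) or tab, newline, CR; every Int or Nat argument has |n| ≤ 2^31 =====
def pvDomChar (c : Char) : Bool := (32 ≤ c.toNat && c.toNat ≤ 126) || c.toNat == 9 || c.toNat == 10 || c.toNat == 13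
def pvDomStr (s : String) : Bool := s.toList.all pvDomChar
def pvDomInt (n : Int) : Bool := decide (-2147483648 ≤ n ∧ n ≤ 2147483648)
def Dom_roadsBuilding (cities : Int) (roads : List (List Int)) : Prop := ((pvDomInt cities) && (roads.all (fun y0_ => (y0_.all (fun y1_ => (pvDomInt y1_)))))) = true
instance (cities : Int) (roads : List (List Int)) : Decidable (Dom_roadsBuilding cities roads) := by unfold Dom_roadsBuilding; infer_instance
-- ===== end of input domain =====

-- B drops A's pair-by-pair membership testing entirely: it buckets the normalized valid edges by
-- their lower endpoint, sorts each bucket once, and emits the missing roads as the gap ranges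
-- between consecutive sorted neighbours (objective: alternative).

-- ===== PORT A =====
-- the token str(a) + '-' + str(b), kept as a List Char (the sanctioned representation of Python str)
def pvTok (a b : Int) : List Char := PySem.Int.toChars a ++ '-' :: PySem.Int.toChars b

-- body of A's inner loop over j (st = (city_connected, result_arr))
def pvInnerStep (c : Int) (st : PySem.Dict (List Char) Bool × List (List Int)) (j : Int) :
    PySem.Dict (List Char) Bool × List (List Int) :=
  let token := pvTok c j
  if j ≠ c then
    if st.1.contains token = false then
      ((st.1.insert (pvTok c j) true).insert (pvTok j c) true, st.2 ++ [[c, j]])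
    else st
  else st

-- body of A's outer loop over c (current = c)
def pvOuterStep (cities : Int) (st : PySem.Dict (List Char) Bool × List (List Int)) (c : Int) :
    PySem.Dict (List Char) Bool × List (List Int) :=
  (PySem.List.pyRange 0 cities 1).foldl (pvInnerStep c) st

def roadsBuilding (cities : Int) (roads : List (List Int)) : List (List Int) :=
  -- city_set is built by A and never used afterwards
  let _city_set : PySem.Set Int :=
    (PySem.List.pyRange 0 cities 1).foldl (fun s c => PySem.Set.add s c) (PySem.Set.ofList [])
  let city_connected : PySem.Dict (List Char) Bool :=
    roads.foldl (fun d r =>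
      (d.insert (pvTok (PySem.List.pyGetD r 0 0) (PySem.List.pyGetD r 1 0)) true).insert
        (pvTok (PySem.List.pyGetD r 1 0) (PySem.List.pyGetD r 0 0)) true) PySem.Dict.empty
  let res :=
    (PySem.List.pyRange 0 cities 1).foldl (pvOuterStep cities) (city_connected, ([] : List (List Int)))
  res.2

-- ===== PORT B =====
-- lo, hi = (a, b) if a < b else (b, a)   with a = r[0], b = r[1]
def pvNorm (r : List Int) : Int × Int :=
  if PySem.List.pyGetD r 0 0 < PySem.List.pyGetD r 1 0 then
    (PySem.List.pyGetD r 0 0, PySem.List.pyGetD r 1 0)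
  else (PySem.List.pyGetD r 1 0, PySem.List.pyGetD r 0 0)

-- the guard 0 <= lo < hi < cities
def pvOk (cities : Int) (r : List Int) : Bool :=
  decide (0 ≤ (pvNorm r).1 ∧ (pvNorm r).1 < (pvNorm r).2 ∧ (pvNorm r).2 < cities)

-- result.append([i, j]) for j in range(prev + 1, v); prev = v   (st = (prev, result))
def pvGapStep (i : Int) (st : Int × List (List Int)) (v : Int) : Int × List (List Int) :=
  (v, st.2 ++ (PySem.List.pyRange (st.1 + 1) v 1).map (fun j => [i, j]))

def roadsBuilding_alt (cities : Int) (roads : List (List Int)) : List (List Int) :=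
  let pairs : List (Int × Int) :=
    roads.foldl (fun acc r => if pvOk cities r then acc ++ [pvNorm r] else acc) []
  let adj : PySem.Dict Int (List Int) :=
    pairs.foldl (fun d p => d.modify p.1 [] (fun l => l ++ [p.2])) PySem.Dict.empty
  (PySem.List.pyRange 0 cities 1).foldl (fun acc i =>
    ((PySem.List.sorted (PySem.Set.ofList (adj.getD i [])) (fun x => x) false) ++ [cities]).foldl
      (pvGapStep i) (i, acc) |>.2) []

-- ===== PRECONDITION & SPEC =====
-- Pre_ excludes only inputs where the Python A raises IndexError: a road row shorter than 2 entries.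
def Pre_roadsBuilding (cities : Int) (roads : List (List Int)) : Prop :=
  ∀ r ∈ roads, 2 ≤ r.length
instance (cities : Int) (roads : List (List Int)) : Decidable (Pre_roadsBuilding cities roads) := by
  unfold Pre_roadsBuilding; infer_instance
def pvWitness_roadsBuilding : Int × List (List Int) := (3, [[0, 1]])

def Spec_roadsBuilding (cities : Int) (roads : List (List Int)) (out : List (List Int)) : Prop := out = roadsBuilding_alt cities roads
instance (cities : Int) (roads : List (List Int)) (out : List (List Int)) : Decidable (Spec_roadsBuilding cities roads out) := by unfold Spec_roadsBuilding; infer_instance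

-- ===== CLAIM (what is proved, stated in full; the proofs are below) =====
def Claim_equal_roadsBuilding : Prop := ∀ (cities : Int) (roads : List (List Int)), Dom_roadsBuilding cities roads → Pre_roadsBuilding cities roads → Spec_roadsBuilding cities roads (roadsBuilding cities roads)

-- ===== LEMMAS AND PROOFS =====

-- ---- str(n) facts: decimal digits, no '-' except a leading sign, injectivity ----

-- decimal digits of a Nat, most significant first (what Nat.toDigits 10 computes)
def pvRepr (n : Nat) : List Char :=
  if _h : n < 10 then [Nat.digitChar n]
  else pvRepr (n / 10) ++ [Nat.digitChar (n % 10)]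
decreasing_by exact Nat.div_lt_self (by omega) (by omega)

lemma pvRepr_toDigitsCore : ∀ (f n : Nat) (acc : List Char), n < f →
    Nat.toDigitsCore 10 f n acc = pvRepr n ++ acc := by
  intro f
  induction f with
  | zero => intro n acc h; omega
  | succ f ih =>
    intro n acc h
    rw [Nat.toDigitsCore]
    by_cases h10 : n < 10
    · have : n / 10 = 0 := Nat.div_eq_of_lt h10
      simp [this, pvRepr, h10, Nat.mod_eq_of_lt h10]
    · have hdiv : n / 10 ≠ 0 := by
        intro hc; have := Nat.lt_of_div_eq_zero (by omega) hc; omega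
      simp only [hdiv]
      rw [ih (n / 10) _ (by omega)]
      conv_rhs => rw [pvRepr]
      simp [h10]

lemma pvRepr_toChars (n : Int) :
    PySem.Int.toChars n = if n < 0 then '-' :: pvRepr n.natAbs else pvRepr n.toNat := by
  unfold PySem.Int.toChars Nat.toDigits
  split_ifs with h
  · rw [pvRepr_toDigitsCore _ _ _ (Nat.lt_succ_self _)]; simp
  · rw [pvRepr_toDigitsCore _ _ _ (Nat.lt_succ_self _)]; simp

lemma pvRepr_ne_nil (n : Nat) : pvRepr n ≠ [] := by
  rw [pvRepr]; split_ifs <;> simp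

lemma pvRepr_isDigit (n : Nat) : ∀ c ∈ pvRepr n, c.isDigit = true := by
  induction n using Nat.strong_induction_on with
  | _ n ih =>
    rw [pvRepr]
    split_ifs with h
    · intro c hc
      simp at hc; subst hc
      interval_cases n <;> decide
    · intro c hc
      simp at hc
      rcases hc with hc | hc
      · exact ih (n / 10) (Nat.div_lt_self (by omega) (by omega)) c hc
      · subst hc
        have : n % 10 < 10 := Nat.mod_lt _ (by omega)
        interval_cases h10 : n % 10 <;> simp_all

lemma pvDigitChar_inj (m n : Nat) (hm : m < 10) (hn : n < 10)
    (h : Nat.digitChar m = Nat.digitChar n) : m = n := by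
  interval_cases m <;> interval_cases n <;> simp_all [Nat.digitChar]

lemma pvRepr_inj : ∀ (m n : Nat), pvRepr m = pvRepr n → m = n := by
  intro m
  induction m using Nat.strong_induction_on with
  | _ m ih =>
    intro n h
    rw [pvRepr] at h; conv_rhs at h => rw [pvRepr]
    split_ifs at h with hm hn hn
    · simp at h; exact pvDigitChar_inj _ _ hm hn h
    · exfalso
      have := congrArg List.length h
      simp at this
      have := pvRepr_ne_nil (n / 10)
      cases hnil : pvRepr (n / 10) <;> simp_all
    · exfalso
      have := congrArg List.length h
      simp at this
      have := pvRepr_ne_nil (m / 10)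
      cases hnil : pvRepr (m / 10) <;> simp_all
    · simp only [← List.concat_eq_append, List.concat_inj] at h
      obtain ⟨h1, h2⟩ := h
      have hd := ih (m / 10) (by omega) (n / 10) h1
      have hm2 := pvDigitChar_inj (m % 10) (n % 10) (by omega) (by omega) h2
      omega

lemma pvIsDigit_ne_dash {c : Char} (h : c.isDigit = true) : c ≠ '-' := by
  intro he; subst he; simp [Char.isDigit] at h

lemma pvToChars_ne_nil (n : Int) : PySem.Int.toChars n ≠ [] := by
  rw [pvRepr_toChars]; split_ifs <;> simp [pvRepr_ne_nil]

lemma pvToChars_inj {a b : Int} (h : PySem.Int.toChars a = PySem.Int.toChars b) : a = b := by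
  rw [pvRepr_toChars, pvRepr_toChars] at h
  split_ifs at h with ha hb hb
  · simp at h
    have := pvRepr_inj _ _ h
    omega
  · exfalso
    rcases hnil : pvRepr b.toNat with _ | ⟨c, cs⟩
    · exact pvRepr_ne_nil _ hnil
    · rw [hnil] at h
      have hc : c.isDigit = true := pvRepr_isDigit _ c (by rw [hnil]; simp)
      have := List.head_eq_of_cons_eq h
      exact pvIsDigit_ne_dash hc this.symm
  · exfalso
    rcases hnil : pvRepr a.toNat with _ | ⟨c, cs⟩
    · exact pvRepr_ne_nil _ hnil
    · rw [hnil] at h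
      have hc : c.isDigit = true := pvRepr_isDigit _ c (by rw [hnil]; simp)
      have := List.head_eq_of_cons_eq h
      exact pvIsDigit_ne_dash hc this
  · have := pvRepr_inj _ _ h
    omega

lemma pvToChars_noDashTail (n : Int) :
    ∀ k (hk : k < (PySem.Int.toChars n).length), k ≠ 0 → (PySem.Int.toChars n)[k] ≠ '-' := by
  intro k hk hk0
  rw [List.getElem_of_eq (pvRepr_toChars n) hk]
  split_ifs with h
  · rcases k with _ | k
    · omega
    · simp only [List.getElem_cons_succ]
      exact pvIsDigit_ne_dash (pvRepr_isDigit _ _ (List.getElem_mem _))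
  · exact pvIsDigit_ne_dash (pvRepr_isDigit _ _ (List.getElem_mem _))

lemma pvDashSplitAux {s1 s2 t1 t2 : List Char} (hs : s1 ≠ [])
    (htd : ∀ k (hk : k < t1.length), k ≠ 0 → t1[k] ≠ '-')
    (h : s1 ++ '-' :: s2 = t1 ++ '-' :: t2) (hlt : s1.length < t1.length) : False := by
  have e1 : (s1 ++ '-' :: s2)[s1.length]? = some '-' := by
    rw [List.getElem?_append_right (le_refl _)]
    simp
  rw [h] at e1
  rw [List.getElem?_append_left hlt] at e1
  rw [List.getElem?_eq_some_iff] at e1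
  obtain ⟨hb, hv⟩ := e1
  exact htd _ hb (by have := List.length_pos_iff.mpr hs; omega) hv

lemma pvTok_inj {a b c d : Int} (h : pvTok a b = pvTok c d) : a = c ∧ b = d := by
  unfold pvTok at h
  have hlen : (PySem.Int.toChars a).length = (PySem.Int.toChars c).length := by
    rcases lt_trichotomy (PySem.Int.toChars a).length (PySem.Int.toChars c).length with hlt | he | hlt
    · exact absurd (pvDashSplitAux (pvToChars_ne_nil a) (pvToChars_noDashTail c) h hlt) not_false
    · exact he
    · exact absurd (pvDashSplitAux (pvToChars_ne_nil c) (pvToChars_noDashTail a) h.symm hlt) not_false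
  obtain ⟨h1, h2⟩ := List.append_inj h hlen
  simp at h2
  exact ⟨pvToChars_inj h1, pvToChars_inj h2⟩
lemma pvTok_beq (a b x y : Int) :
    (pvTok a b == pvTok x y) = (decide (a = x) && decide (b = y)) := by
  rw [Bool.eq_iff_iff]
  simp only [beq_iff_eq, Bool.and_eq_true, decide_eq_true_eq]
  constructor
  · exact fun h => pvTok_inj h
  · rintro ⟨rfl, rfl⟩; rfl

def pvE0 (roads : List (List Int)) (a b : Int) : Bool :=
  roads.any (fun r =>
    (PySem.List.pyGetD r 0 0 == a && PySem.List.pyGetD r 1 0 == b) ||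
    (PySem.List.pyGetD r 1 0 == a && PySem.List.pyGetD r 0 0 == b))

lemma pvE0_symm (roads : List (List Int)) (a b : Int) : pvE0 roads a b = pvE0 roads b a := by
  rw [Bool.eq_iff_iff]
  simp only [pvE0, List.any_eq_true, Bool.or_eq_true, Bool.and_eq_true, beq_iff_eq]
  constructor <;> (rintro ⟨r, hr, (⟨h1, h2⟩ | ⟨h1, h2⟩)⟩; exacts [⟨r, hr, Or.inr ⟨h2, h1⟩⟩, ⟨r, hr, Or.inl ⟨h2, h1⟩⟩])

def pvDInv (d : PySem.Dict (List Char) Bool) (S : Int → Int → Bool) : Prop :=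
  ∀ a b : Int, d.contains (pvTok a b) = S a b

lemma pvDInv_congr {d : PySem.Dict (List Char) Bool} {S T : Int → Int → Bool}
    (h : pvDInv d S) (hST : ∀ a b, S a b = T a b) : pvDInv d T := by
  intro a b; rw [h a b, hST]

lemma pvDInv_insert2 {d : PySem.Dict (List Char) Bool} {S : Int → Int → Bool}
    (h : pvDInv d S) (x y : Int) :
    pvDInv ((d.insert (pvTok x y) true).insert (pvTok y x) true)
      (fun a b => (decide (a = x) && decide (b = y)) || (decide (a = y) && decide (b = x)) || S a b) := by
  intro a b
  rw [PySem.Dict.contains_insert, PySem.Dict.contains_insert, pvTok_beq, pvTok_beq, h a b]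
  rw [Bool.eq_iff_iff]
  simp only [Bool.or_eq_true, Bool.and_eq_true, decide_eq_true_eq]
  tauto

lemma pvD0_contains (roads : List (List Int)) :
    pvDInv (roads.foldl (fun d r =>
      (d.insert (pvTok (PySem.List.pyGetD r 0 0) (PySem.List.pyGetD r 1 0)) true).insert
        (pvTok (PySem.List.pyGetD r 1 0) (PySem.List.pyGetD r 0 0)) true) PySem.Dict.empty)
      (pvE0 roads) := by
  have main : ∀ (rs : List (List Int)) (d : PySem.Dict (List Char) Bool) (a b : Int),
      (rs.foldl (fun d r =>
        (d.insert (pvTok (PySem.List.pyGetD r 0 0) (PySem.List.pyGetD r 1 0)) true).insert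
          (pvTok (PySem.List.pyGetD r 1 0) (PySem.List.pyGetD r 0 0)) true) d).contains (pvTok a b)
      = (d.contains (pvTok a b) || pvE0 rs a b) := by
    intro rs
    induction rs with
    | nil => intro d a b; simp [pvE0]
    | cons r rs ih =>
      intro d a b
      rw [List.foldl_cons, ih]
      rw [PySem.Dict.contains_insert, PySem.Dict.contains_insert, pvTok_beq, pvTok_beq]
      rw [Bool.eq_iff_iff]
      simp only [pvE0, List.any_cons, Bool.or_eq_true, Bool.and_eq_true, decide_eq_true_eq, beq_iff_eq]
      tauto
  intro a b
  rw [main roads PySem.Dict.empty a b]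
  simp

lemma pvInner (cities c : Int) : ∀ (n : Nat) (lo : Int), (cities - lo).toNat = n →
    ∀ (S : Int → Int → Bool) (d : PySem.Dict (List Char) Bool) (acc : List (List Int)),
    pvDInv d S →
    ((PySem.List.pyRange lo cities 1).foldl (pvInnerStep c) (d, acc)).2
      = acc ++ ((PySem.List.pyRange lo cities 1).filter (fun j => (j != c) && !(S c j))).map (fun j => [c, j])
    ∧ pvDInv ((PySem.List.pyRange lo cities 1).foldl (pvInnerStep c) (d, acc)).1
        (fun a b => S a b ||
          decide ((a = c ∧ lo ≤ b ∧ b < cities ∧ b ≠ c ∧ S c b = false) ∨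
                  (b = c ∧ lo ≤ a ∧ a < cities ∧ a ≠ c ∧ S c a = false))) := by
  intro n
  induction n with
  | zero =>
    intro lo hn S d acc hInv
    rw [PySem.List.pyRange_one_eq_nil (by omega)]
    simp only [List.foldl_nil, List.filter_nil, List.map_nil, List.append_nil]
    refine ⟨by trivial, pvDInv_congr hInv ?_⟩
    intro a b
    have hd : decide ((a = c ∧ lo ≤ b ∧ b < cities ∧ b ≠ c ∧ S c b = false) ∨
        (b = c ∧ lo ≤ a ∧ a < cities ∧ a ≠ c ∧ S c a = false)) = false := by
      simp only [decide_eq_false_iff_not]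
      rintro (⟨_, h1, h2, _⟩ | ⟨_, h1, h2, _⟩) <;> omega
    rw [hd, Bool.or_false]
  | succ n ih =>
    intro lo hn S d acc hInv
    have hlo : lo < cities := by omega
    rw [PySem.List.pyRange_one_cons hlo]
    simp only [List.foldl_cons, List.filter_cons]
    by_cases hc : lo = c
    · -- j = c : skipped
      have hstep : pvInnerStep c (d, acc) lo = (d, acc) := by
        simp [pvInnerStep, hc]
      rw [hstep]
      obtain ⟨h2, h1⟩ := ih (lo + 1) (by omega) S d acc hInv
      have hfilt : ((lo != c) && !(S c lo)) = false := by simp [hc]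
      rw [hfilt]
      simp only [if_neg Bool.false_ne_true]
      refine ⟨h2, pvDInv_congr h1 ?_⟩
      intro a b
      congr 1
      rw [Bool.eq_iff_iff, decide_eq_true_eq, decide_eq_true_eq]
      constructor
      · rintro (⟨h1, h2, h3, h4, h5⟩ | ⟨h1, h2, h3, h4, h5⟩)
        · exact Or.inl ⟨h1, by omega, h3, h4, h5⟩
        · exact Or.inr ⟨h1, by omega, h3, h4, h5⟩
      · rintro (⟨h1, h2, h3, h4, h5⟩ | ⟨h1, h2, h3, h4, h5⟩)
        · exact Or.inl ⟨h1, by omega, h3, h4, h5⟩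
        · exact Or.inr ⟨h1, by omega, h3, h4, h5⟩
    · have hquery : (d, acc).1.contains (pvTok c lo) = S c lo := hInv c lo
      by_cases hS : S c lo = true
      · -- already connected: state unchanged
        have hstep : pvInnerStep c (d, acc) lo = (d, acc) := by
          simp only [pvInnerStep, hquery, hS]
          simp
        rw [hstep]
        obtain ⟨h2, h1⟩ := ih (lo + 1) (by omega) S d acc hInv
        have hfilt : ((lo != c) && !(S c lo)) = false := by simp [hS]
        rw [hfilt]
        simp only [if_neg Bool.false_ne_true]
        refine ⟨h2, pvDInv_congr h1 ?_⟩
        intro a b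
        congr 1
        rw [Bool.eq_iff_iff, decide_eq_true_eq, decide_eq_true_eq]
        constructor
        · rintro (⟨h1, h2, h3, h4, h5⟩ | ⟨h1, h2, h3, h4, h5⟩)
          · exact Or.inl ⟨h1, by omega, h3, h4, h5⟩
          · exact Or.inr ⟨h1, by omega, h3, h4, h5⟩
        · rintro (⟨h1, h2, h3, h4, h5⟩ | ⟨h1, h2, h3, h4, h5⟩)
          · refine Or.inl ⟨h1, ?_, h3, h4, h5⟩
            rcases eq_or_lt_of_le h2 with he | hl
            · exfalso; rw [← he] at h5; rw [h5] at hS; exact Bool.false_ne_true hS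
            · omega
          · refine Or.inr ⟨h1, ?_, h3, h4, h5⟩
            rcases eq_or_lt_of_le h2 with he | hl
            · exfalso; rw [← he] at h5; rw [h5] at hS; exact Bool.false_ne_true hS
            · omega
      · -- new pair: appended and marked
        have hSf : S c lo = false := by revert hS; cases S c lo <;> simp
        have hstep : pvInnerStep c (d, acc) lo =
            ((d.insert (pvTok c lo) true).insert (pvTok lo c) true, acc ++ [[c, lo]]) := by
          simp [pvInnerStep, hquery, hSf, hc]
        rw [hstep]
        have hd' := pvDInv_insert2 hInv c lo
        obtain ⟨h2, h1⟩ := ih (lo + 1) (by omega) _ _ (acc ++ [[c, lo]]) hd'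
        have hfilt : ((lo != c) && !(S c lo)) = true := by
          rw [hSf]; simp; exact hc
        rw [hfilt, if_pos rfl]
        constructor
        · rw [h2, List.append_assoc]
          have hfc : ∀ j ∈ PySem.List.pyRange (lo + 1) cities 1,
              (j != c && !(decide (c = c) && decide (j = lo) || decide (c = lo) && decide (j = c) || S c j))
              = (j != c && !(S c j)) := by
            intro j hj
            rw [PySem.List.mem_pyRange_one] at hj
            have hjlo : decide (j = lo) = false := by simp; omega
            have hclo : decide (c = lo) = false := by simp; omega
            simp [hjlo, hclo]
          rw [List.filter_congr hfc]
          simp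
        · apply pvDInv_congr h1
          intro a b
          have hclo : decide (c = lo) = false := by simp; omega
          rw [Bool.eq_iff_iff]
          simp only [Bool.or_eq_true, Bool.and_eq_true, decide_eq_true_eq, decide_true,
            Bool.true_and, hclo, Bool.false_and, Bool.or_eq_false_iff,
            decide_eq_false_iff_not]
          constructor
          · rintro (((⟨ha, hb⟩ | ⟨ha, hb⟩) | hS2) | (⟨h1, h2, h3, h4, ⟨h5, -⟩, h6⟩ | ⟨h1, h2, h3, h4, ⟨h5, -⟩, h6⟩))
            · exact Or.inr (Or.inl ⟨ha, by omega, by omega, by omega, by rw [hb]; exact hSf⟩)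
            · exact Or.inr (Or.inr ⟨hb, by omega, by omega, by omega, by rw [ha]; exact hSf⟩)
            · exact Or.inl hS2
            · exact Or.inr (Or.inl ⟨h1, by omega, h3, h4, h6⟩)
            · exact Or.inr (Or.inr ⟨h1, by omega, h3, h4, h6⟩)
          · rintro (hS2 | (⟨h1, h2, h3, h4, h5⟩ | ⟨h1, h2, h3, h4, h5⟩))
            · exact Or.inl (Or.inr hS2)
            · by_cases hb : b = lo
              · exact Or.inl (Or.inl (Or.inl ⟨h1, hb⟩))
              · exact Or.inr (Or.inl ⟨h1, by omega, h3, h4, ⟨hb, trivial⟩, h5⟩)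
            · by_cases ha : a = lo
              · exact Or.inl (Or.inl (Or.inr ⟨ha, h1⟩))
              · exact Or.inr (Or.inr ⟨h1, by omega, h3, h4, ⟨ha, trivial⟩, h5⟩)

def pvS (roads : List (List Int)) (cities c0 : Int) (a b : Int) : Bool :=
  pvE0 roads a b ||
    decide ((0 ≤ a ∧ a < c0 ∧ a < b ∧ b < cities ∧ pvE0 roads a b = false) ∨
            (0 ≤ b ∧ b < c0 ∧ b < a ∧ a < cities ∧ pvE0 roads b a = false))

lemma pvS_row (roads : List (List Int)) (cities c0 j : Int) (_h0 : 0 ≤ c0) (hc : c0 < cities) :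
    pvS roads cities c0 c0 j = if 0 ≤ j ∧ j < c0 then true else pvE0 roads c0 j := by
  unfold pvS
  split_ifs with hj
  · cases hE : pvE0 roads c0 j
    · rw [Bool.false_or]
      simp only [decide_eq_true_eq]
      right
      refine ⟨by omega, by omega, by omega, hc, ?_⟩
      rw [pvE0_symm, hE]
    · simp
  · cases hE : pvE0 roads c0 j
    · rw [Bool.false_or]
      simp only [decide_eq_false_iff_not]
      rintro (⟨h1, h2, h3, h4, h5⟩ | ⟨h1, h2, h3, h4, h5⟩) <;> omega
    · simp

lemma pvOuter (roads : List (List Int)) (cities : Int) :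
    ∀ (n : Nat) (c0 : Int), 0 ≤ c0 → (cities - c0).toNat = n →
    ∀ (d : PySem.Dict (List Char) Bool) (acc : List (List Int)),
    pvDInv d (pvS roads cities c0) →
    ((PySem.List.pyRange c0 cities 1).foldl (pvOuterStep cities) (d, acc)).2
      = acc ++ (PySem.List.pyRange c0 cities 1).flatMap (fun i =>
          ((PySem.List.pyRange (i + 1) cities 1).filter (fun j => !(pvE0 roads i j))).map
            (fun j => [i, j])) := by
  intro n
  induction n with
  | zero =>
    intro c0 h0 hn d acc hInv
    rw [PySem.List.pyRange_one_eq_nil (by omega)]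
    simp
  | succ n ih =>
    intro c0 h0 hn d acc hInv
    have hc : c0 < cities := by omega
    rw [PySem.List.pyRange_one_cons hc]
    simp only [List.foldl_cons, List.flatMap_cons]
    obtain ⟨h2, h1⟩ := pvInner cities c0 (cities - 0).toNat 0 rfl _ d acc hInv
    have hrange : PySem.List.pyRange 0 cities 1
        = PySem.List.pyRange 0 (c0 + 1) 1 ++ PySem.List.pyRange (c0 + 1) cities 1 :=
      PySem.List.pyRange_one_append 0 (c0 + 1) cities (by omega) (by omega)
    -- the filtered inner range is exactly the triangular row of c0
    have hfilt : (PySem.List.pyRange 0 cities 1).filter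
          (fun j => (j != c0) && !(pvS roads cities c0 c0 j))
        = (PySem.List.pyRange (c0 + 1) cities 1).filter (fun j => !(pvE0 roads c0 j)) := by
      rw [hrange, List.filter_append]
      have hleft : (PySem.List.pyRange 0 (c0 + 1) 1).filter
          (fun j => (j != c0) && !(pvS roads cities c0 c0 j)) = [] := by
        rw [List.filter_eq_nil_iff]
        intro j hj
        rw [PySem.List.mem_pyRange_one] at hj
        by_cases hjc : j = c0
        · simp [hjc]
        · rw [pvS_row roads cities c0 j h0 hc, if_pos (by omega)]
          simp
      rw [hleft, List.nil_append]
      apply List.filter_congr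
      intro j hj
      rw [PySem.List.mem_pyRange_one] at hj
      rw [pvS_row roads cities c0 j h0 hc, if_neg (by omega)]
      have : (j != c0) = true := by simp; omega
      rw [this, Bool.true_and]
    -- the dict invariant advances from c0 to c0 + 1
    have hnext : pvDInv ((PySem.List.pyRange 0 cities 1).foldl (pvInnerStep c0) (d, acc)).1
        (pvS roads cities (c0 + 1)) := by
      apply pvDInv_congr h1
      intro a b
      rw [Bool.eq_iff_iff]
      unfold pvS
      simp only [Bool.or_eq_true, decide_eq_true_eq, Bool.or_eq_false_iff,
        decide_eq_false_iff_not]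
      constructor
      · rintro ((hE | h) | h)
        · exact Or.inl hE
        · rcases h with ⟨h1', h2', h3', h4', h5'⟩ | ⟨h1', h2', h3', h4', h5'⟩
          · exact Or.inr (Or.inl ⟨h1', by omega, h3', h4', h5'⟩)
          · exact Or.inr (Or.inr ⟨h1', by omega, h3', h4', h5'⟩)
        · rcases h with ⟨hab, hb0, hbc, hbne, hE, hno⟩ | ⟨hab, hb0, hbc, hbne, hE, hno⟩
          · -- a = c0, row pair (c0, b) with c0 < b
            subst hab
            have hb : a < b := by
              by_contra hh
              exact hno (Or.inr ⟨by omega, by omega, by omega, by omega, by rw [pvE0_symm]; exact hE⟩)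
            exact Or.inr (Or.inl ⟨by omega, by omega, hb, hbc, hE⟩)
          · subst hab
            have ha : b < a := by
              by_contra hh
              exact hno (Or.inr ⟨by omega, by omega, by omega, by omega, by rw [pvE0_symm]; exact hE⟩)
            exact Or.inr (Or.inr ⟨by omega, by omega, ha, hbc, hE⟩)
      · rintro (hE | (⟨h1', h2', h3', h4', h5'⟩ | ⟨h1', h2', h3', h4', h5'⟩))
        · exact Or.inl (Or.inl hE)
        · by_cases hac : a = c0
          · subst hac
            refine Or.inr (Or.inl ⟨rfl, by omega, h4', by omega, h5', ?_⟩)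
            rintro (⟨g1, g2, g3, g4, g5⟩ | ⟨g1, g2, g3, g4, g5⟩) <;> omega
          · exact Or.inl (Or.inr (Or.inl ⟨h1', by omega, h3', h4', h5'⟩))
        · by_cases hbc : b = c0
          · subst hbc
            refine Or.inr (Or.inr ⟨rfl, by omega, h4', by omega, h5', ?_⟩)
            rintro (⟨g1, g2, g3, g4, g5⟩ | ⟨g1, g2, g3, g4, g5⟩) <;> omega
          · exact Or.inl (Or.inr (Or.inr ⟨h1', by omega, h3', h4', h5'⟩))
    have := ih (c0 + 1) (by omega) (by omega)
      ((PySem.List.pyRange 0 cities 1).foldl (pvInnerStep c0) (d, acc)).1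
      ((PySem.List.pyRange 0 cities 1).foldl (pvInnerStep c0) (d, acc)).2 hnext
    have hfold : (PySem.List.pyRange (c0 + 1) cities 1).foldl (pvOuterStep cities)
        (pvOuterStep cities (d, acc) c0)
        = (PySem.List.pyRange (c0 + 1) cities 1).foldl (pvOuterStep cities)
          (((PySem.List.pyRange 0 cities 1).foldl (pvInnerStep c0) (d, acc)).1,
           ((PySem.List.pyRange 0 cities 1).foldl (pvInnerStep c0) (d, acc)).2) := rfl
    rw [hfold, this, h2, hfilt, List.append_assoc]

-- A as the canonical triangular flatMap of rows filtered by pvE0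
lemma pvA_canon (cities : Int) (roads : List (List Int)) :
    roadsBuilding cities roads
      = (PySem.List.pyRange 0 cities 1).flatMap (fun i =>
          ((PySem.List.pyRange (i + 1) cities 1).filter (fun j => !(pvE0 roads i j))).map
            (fun j => [i, j])) := by
  unfold roadsBuilding
  simp only []
  have hInv0 : pvDInv (roads.foldl (fun d r =>
      (d.insert (pvTok (PySem.List.pyGetD r 0 0) (PySem.List.pyGetD r 1 0)) true).insert
        (pvTok (PySem.List.pyGetD r 1 0) (PySem.List.pyGetD r 0 0)) true) PySem.Dict.empty)
      (pvS roads cities 0) := by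
    apply pvDInv_congr (pvD0_contains roads)
    intro a b
    unfold pvS
    have hd : decide ((0 ≤ a ∧ a < 0 ∧ a < b ∧ b < cities ∧ pvE0 roads a b = false) ∨
        (0 ≤ b ∧ b < 0 ∧ b < a ∧ a < cities ∧ pvE0 roads b a = false)) = false := by
      simp only [decide_eq_false_iff_not]
      rintro (⟨_, _, _⟩ | ⟨_, _, _⟩) <;> omega
    rw [hd, Bool.or_false]
  have hA := pvOuter roads cities (cities - 0).toNat 0 (le_refl 0) rfl _ [] hInv0
  rw [hA, List.nil_append]

-- ---- B-side: buckets, sorted neighbours, gap emission ----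

-- B's first loop is the filtered map of pvNorm over roads
lemma pvPairs_eq (cities : Int) (roads : List (List Int)) :
    roads.foldl (fun acc r => if pvOk cities r then acc ++ [pvNorm r] else acc) []
      = (roads.filter (pvOk cities)).map pvNorm := by
  rw [PySem.List.foldl_append_if (pvOk cities) pvNorm roads []]
  simp

-- membership in the normalized valid pairs ↔ pvE0, for a triangular in-range pair
lemma pvPairs_mem (cities : Int) (roads : List (List Int)) (i j : Int)
    (h0 : 0 ≤ i) (hij : i < j) (hjc : j < cities) :
    ((i, j) ∈ (roads.filter (pvOk cities)).map pvNorm) ↔ pvE0 roads i j = true := by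
  rw [List.mem_map]
  unfold pvE0
  simp only [List.mem_filter, List.any_eq_true, Bool.or_eq_true, Bool.and_eq_true, beq_iff_eq]
  constructor
  · rintro ⟨r, ⟨hr, -⟩, hnorm⟩
    unfold pvNorm at hnorm
    refine ⟨r, hr, ?_⟩
    split_ifs at hnorm
    · exact Or.inl ⟨congrArg Prod.fst hnorm, congrArg Prod.snd hnorm⟩
    · exact Or.inr ⟨congrArg Prod.fst hnorm, congrArg Prod.snd hnorm⟩
  · rintro ⟨r, hr, h⟩
    have hnorm : pvNorm r = (i, j) := by
      unfold pvNorm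
      rcases h with ⟨ha, hb⟩ | ⟨hb, ha⟩
      · rw [ha, hb, if_pos hij]
      · rw [ha, hb, if_neg (by omega)]
    refine ⟨r, ⟨hr, ?_⟩, hnorm⟩
    unfold pvOk
    rw [hnorm]
    simp only [decide_eq_true_eq]
    exact ⟨h0, hij, hjc⟩

-- the gap-emission loop produces exactly the row complement of ns
lemma pvGap (cities i : Int) : ∀ (ns : List Int), ns.Pairwise (· < ·) →
    ∀ (prev : Int) (acc : List (List Int)), (∀ v ∈ ns, prev < v ∧ v < cities) →
    ((ns ++ [cities]).foldl (pvGapStep i) (prev, acc)).2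
      = acc ++ ((PySem.List.pyRange (prev + 1) cities 1).filter
          (fun j => decide (j ∉ ns))).map (fun j => [i, j]) := by
  intro ns
  induction ns with
  | nil =>
    intro _ prev acc _
    simp only [List.nil_append, List.foldl_cons, List.foldl_nil, pvGapStep]
    have : (PySem.List.pyRange (prev + 1) cities 1).filter (fun j => decide (j ∉ ([] : List Int)))
        = PySem.List.pyRange (prev + 1) cities 1 := by
      apply List.filter_eq_self.mpr
      intro j _
      simp
    rw [this]
  | cons v ns ih =>
    intro hpw prev acc hmem
    obtain ⟨hv, hvc⟩ := hmem v (by simp)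
    have hns : ∀ w ∈ ns, v < w ∧ w < cities := by
      intro w hw
      exact ⟨(List.pairwise_cons.mp hpw).1 w hw, (hmem w (by simp [hw])).2⟩
    simp only [List.cons_append, List.foldl_cons, pvGapStep]
    rw [ih (List.pairwise_cons.mp hpw).2 v (acc ++ (PySem.List.pyRange (prev + 1) v 1).map (fun j => [i, j])) hns]
    rw [List.append_assoc]
    congr 1
    have hsplit : PySem.List.pyRange (prev + 1) cities 1
        = PySem.List.pyRange (prev + 1) v 1 ++ (v :: PySem.List.pyRange (v + 1) cities 1) := by
      rw [PySem.List.pyRange_one_append (prev + 1) v cities (by omega) (by omega),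
        PySem.List.pyRange_one_cons hvc]
    rw [hsplit, List.filter_append, List.filter_cons]
    have hleft : (PySem.List.pyRange (prev + 1) v 1).filter (fun j => decide (j ∉ v :: ns))
        = PySem.List.pyRange (prev + 1) v 1 := by
      apply List.filter_eq_self.mpr
      intro j hj
      rw [PySem.List.mem_pyRange_one] at hj
      simp only [decide_eq_true_eq, List.mem_cons, not_or]
      refine ⟨by omega, fun hjn => ?_⟩
      have := (hns j hjn).1
      omega
    have hvdrop : (decide (v ∉ v :: ns)) = false := by simp
    rw [hleft, hvdrop]
    simp only [if_neg Bool.false_ne_true]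
    have hright : (PySem.List.pyRange (v + 1) cities 1).filter (fun j => decide (j ∉ v :: ns))
        = (PySem.List.pyRange (v + 1) cities 1).filter (fun j => decide (j ∉ ns)) := by
      apply List.filter_congr
      intro j hj
      rw [PySem.List.mem_pyRange_one] at hj
      simp only [List.mem_cons, not_or, decide_eq_decide]
      constructor
      · exact fun h => h.2
      · intro h; exact ⟨by omega, h⟩
    rw [hright, List.map_append]

-- B as the same canonical triangular flatMap
lemma pvB_canon (cities : Int) (roads : List (List Int)) :
    roadsBuilding_alt cities roads
      = (PySem.List.pyRange 0 cities 1).flatMap (fun i =>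
          ((PySem.List.pyRange (i + 1) cities 1).filter (fun j => !(pvE0 roads i j))).map
            (fun j => [i, j])) := by
  unfold roadsBuilding_alt
  simp only []
  rw [pvPairs_eq]
  set pairs := (roads.filter (pvOk cities)).map pvNorm with hpairs
  -- the per-node neighbour list
  have hadj : ∀ i : Int,
      (pairs.foldl (fun d p => d.modify p.1 [] (fun l => l ++ [p.2])) (PySem.Dict.empty : PySem.Dict Int (List Int))).getD i []
        = (pairs.filter (fun p => p.1 == i)).map (fun p => p.2) := by
    intro i
    rw [PySem.Dict.getD_foldl_modify_append pairs (PySem.Dict.empty : PySem.Dict Int (List Int)) i]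
    simp
  -- each outer-loop body appends the row of i
  have hbody : ∀ (acc : List (List Int)) (i : Int), 0 ≤ i → i < cities →
      (((PySem.List.sorted (PySem.Set.ofList
          ((pairs.foldl (fun d p => d.modify p.1 [] (fun l => l ++ [p.2])) (PySem.Dict.empty : PySem.Dict Int (List Int))).getD i []))
          (fun x => x) false) ++ [cities]).foldl (pvGapStep i) (i, acc)).2
        = acc ++ ((PySem.List.pyRange (i + 1) cities 1).filter (fun j => !(pvE0 roads i j))).map
            (fun j => [i, j]) := by
    intro acc i h0 hic
    rw [hadj i]
    set lst := (pairs.filter (fun p => p.1 == i)).map (fun p => p.2) with hlst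
    set ns := PySem.List.sorted (PySem.Set.ofList lst) (fun x => x) false with hns
    have hmemns : ∀ j, j ∈ ns ↔ (i, j) ∈ pairs := by
      intro j
      rw [hns, PySem.List.mem_sorted, PySem.Set.mem_ofList, hlst, List.mem_map]
      constructor
      · rintro ⟨p, hp, hpj⟩
        rw [List.mem_filter] at hp
        have : p = (i, j) := by
          rcases p with ⟨x, y⟩
          have hx : x = i := by simpa using hp.2
          simp only [Prod.mk.injEq]
          exact ⟨hx, hpj⟩
        rw [← this]; exact hp.1
      · intro h
        exact ⟨(i, j), List.mem_filter.mpr ⟨h, by simp⟩, rfl⟩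
    have hpwns : ns.Pairwise (· < ·) := PySem.List.sorted_ofList_pairwise_lt lst
    have hbnd : ∀ v ∈ ns, i < v ∧ v < cities := by
      intro v hv
      have hp := (hmemns v).mp hv
      rw [hpairs, List.mem_map] at hp
      obtain ⟨r, hr, hnorm⟩ := hp
      rw [List.mem_filter] at hr
      have hok := hr.2
      unfold pvOk at hok
      rw [hnorm] at hok
      simp only [decide_eq_true_eq] at hok
      exact ⟨hok.2.1, hok.2.2⟩
    rw [pvGap cities i ns hpwns i acc hbnd]
    congr 1
    congr 1
    apply List.filter_congr
    intro j hj
    rw [PySem.List.mem_pyRange_one] at hj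
    have : (j ∉ ns) ↔ ¬ (pvE0 roads i j = true) := by
      rw [hmemns j, hpairs, pvPairs_mem cities roads i j h0 (by omega) hj.2]
    rw [Bool.eq_iff_iff]
    simp only [decide_eq_true_eq, Bool.not_eq_eq_eq_not, Bool.not_true]
    rw [this]
    constructor
    · intro h; cases hE : pvE0 roads i j
      · rfl
      · exact absurd hE h
    · intro h hE; rw [h] at hE; exact Bool.false_ne_true hE
  -- fold the rows into the flatMap
  have main : ∀ (lo : Int) (n : Nat), 0 ≤ lo → (cities - lo).toNat = n →
      ∀ (acc : List (List Int)),
      (PySem.List.pyRange lo cities 1).foldl (fun acc i =>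
        (((PySem.List.sorted (PySem.Set.ofList
            ((pairs.foldl (fun d p => d.modify p.1 [] (fun l => l ++ [p.2])) (PySem.Dict.empty : PySem.Dict Int (List Int))).getD i []))
            (fun x => x) false) ++ [cities]).foldl (pvGapStep i) (i, acc)).2) acc
      = acc ++ (PySem.List.pyRange lo cities 1).flatMap (fun i =>
          ((PySem.List.pyRange (i + 1) cities 1).filter (fun j => !(pvE0 roads i j))).map
            (fun j => [i, j])) := by
    intro lo n
    induction n generalizing lo with
    | zero =>
      intro h0 hn acc
      rw [PySem.List.pyRange_one_eq_nil (by omega)]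
      simp
    | succ n ih =>
      intro h0 hn acc
      have hlo : lo < cities := by omega
      rw [PySem.List.pyRange_one_cons hlo]
      simp only [List.foldl_cons, List.flatMap_cons]
      rw [hbody acc lo h0 hlo, ih (lo + 1) (by omega) (by omega), List.append_assoc]
  exact main 0 (cities - 0).toNat (le_refl 0) rfl []

lemma pv_main (cities : Int) (roads : List (List Int)) :
    roadsBuilding cities roads = roadsBuilding_alt cities roads := by
  rw [pvA_canon, pvB_canon]

-- ===== VERDICT (by name: the statement is the Claim_ definition above) =====
theorem roadsBuilding_spec : Claim_equal_roadsBuilding := by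
  intro cities roads _hdom _hpre
  unfold Spec_roadsBuilding
  exact pv_main cities roads
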